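-- pv_equiv track=rewrite | github.com/jcolinpatrick/kryptos | scripts/e_grille_18_equal_misspelling_params.py | keyed_columnar_read
-- ===== SOURCE A (Python) =====
-- import math
--
-- def keyed_columnar_read(text, key_order):
--     """Keyed columnar transposition: write by rows, read columns in key order."""
--     width = len(key_order)
--     nrows = math.ceil(len(text) / width)
--     padded = text.ljust(nrows * width, '?')
--     # Build grid
--     grid = []
--     for r in range(nrows):
--         grid.append(padded[r * width: (r + 1) * width])
--     # Read in key order
--     result = []
--     for col in key_order:
--         for r in range(nrows):
--             ch = grid[r][col] if col < len(grid[r]) else '?'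
--             if ch != '?' or (r * width + col) < len(text):
--                 result.append(ch)
--     return ''.join(c for c in result if c != '?')[:len(text)]
-- ===== SOURCE B (Python) =====
-- import math
--
-- def keyed_columnar_read(text, key_order):
--     """Keyed columnar transposition read: pad the text to a full rectangle,
--     deal the padded characters round-robin into one pile per column, then
--     read the piles in key order and strip the padding."""
--     width = len(key_order)
--     nrows = math.ceil(len(text) / width)
--     padded = text.ljust(nrows * width, '?')
--     columns = [[] for _ in range(width)]
--     for i, ch in enumerate(padded):
--         columns[i % width].append(ch)
--     picked = [''.join(columns[col]) for col in key_order if col < width]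
--     return ''.join(c for c in ''.join(picked) if c != '?')[:len(text)]
-- ===== Notes on version B (the rewrite author's own statement) =====
-- stated objective: alternative
-- what changed: B replaces A's build-row-grid-then-scan-rows-per-key-column algorithm by a scatter/gather flip: it deals the padded text round-robin into one pile per column in a single pass, then concatenates the piles in key order and strips the padding, with no grid, no per-cell '?' fallback and no per-row append condition; Pre_ excludes only the empty key (both raise ZeroDivisionError) and key entries below -len(key_order), on which B's columns[col] raises IndexError (A too, except that on empty text A returns '').
-- outside the precondition, e.g. on keyed_columnar_read('', [-5]): A returns '', B raises IndexError
import Mathlib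
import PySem

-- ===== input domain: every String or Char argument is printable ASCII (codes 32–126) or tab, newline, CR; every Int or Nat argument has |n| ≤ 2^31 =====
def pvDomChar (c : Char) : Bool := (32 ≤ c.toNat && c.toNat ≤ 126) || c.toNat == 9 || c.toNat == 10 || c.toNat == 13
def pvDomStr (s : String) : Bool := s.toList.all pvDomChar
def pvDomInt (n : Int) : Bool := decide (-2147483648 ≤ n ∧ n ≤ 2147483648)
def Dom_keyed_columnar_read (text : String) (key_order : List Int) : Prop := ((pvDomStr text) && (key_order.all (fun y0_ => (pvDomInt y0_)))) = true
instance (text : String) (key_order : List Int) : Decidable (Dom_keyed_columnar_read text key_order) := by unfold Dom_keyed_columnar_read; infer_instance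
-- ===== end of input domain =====

-- B replaces A's pad/row-grid/per-cell-scan columnar read by dealing the padded text
-- round-robin into one pile per column and gathering the piles in key order
-- (objective: alternative decomposition, same results on Pre_).


-- ===== PORT A =====
-- A-side helpers: the named intermediate values of A (nrows, padded, grid, the inner row loop).
-- nrows = math.ceil(len(text)/width): exact for width > 0; width = 0 (ZeroDivisionError) is excluded by Pre_.
def pvRowsA (t : List Char) (w : Nat) : Nat := (t.length + w - 1) / w

-- padded = text.ljust(nrows*width, '?')
def pvPaddedA (t : List Char) (w : Nat) : List Char :=
  t ++ List.replicate (pvRowsA t w * w - t.length) '?'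

-- grid = [padded[r*width:(r+1)*width] for r in range(nrows)]
def pvGridA (t : List Char) (w : Nat) : List (List Char) :=
  (List.range (pvRowsA t w)).map (fun r =>
    PySem.List.slice (pvPaddedA t w) (some ((r * w : Nat) : Int)) (some (((r + 1) * w : Nat) : Int)))

-- ch = grid[r][col] if col < len(grid[r]) else '?'   (negative col wraps; pyGet? none = IndexError, excluded by Pre_)
def pvChA (t : List Char) (w : Nat) (r : Nat) (col : Int) : Char :=
  if col < PySem.List.len (((pvGridA t w)[r]?).getD [])
  then (PySem.List.pyGet? (((pvGridA t w)[r]?).getD []) col).getD '?' else '?'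

-- the inner 'for r in range(nrows)' loop appending to result
def pvInnerA (t : List Char) (w : Nat) (col : Int) (acc : List Char) : List Char :=
  (List.range (pvRowsA t w)).foldl (fun acc r =>
    if pvChA t w r col ≠ '?' ∨ ((r * w : Nat) : Int) + col < PySem.List.len t
    then acc ++ [pvChA t w r col] else acc) acc

def keyed_columnar_read (text : String) (key_order : List Int) : String :=
  let t := text.toList
  let width := key_order.length
  let result := key_order.foldl (fun acc col => pvInnerA t width col acc) []
  String.ofList ((result.filter (fun c => c ≠ '?')).take t.length)

-- ===== PORT B =====
-- B-side helpers: B computes nrows and padded by the same two lines as A (math.ceil and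
-- ljust), so its port shares pvRowsA/pvPaddedA; everything after differs.
-- the dealing pass 'for i, ch in enumerate(padded): columns[i % width].append(ch)'
-- starting from columns = [[] for _ in range(width)]
def pvScatterB (w : Nat) (u : List Char) : List (List Char) :=
  (PySem.List.enumerate u 0).foldl (fun cols p =>
    PySem.List.pySetD cols (PySem.Int.mod p.1 (w : Int))
      ((PySem.List.pyGetD cols (PySem.Int.mod p.1 (w : Int)) []) ++ [p.2]))
    (List.replicate w [])

-- picked = [''.join(columns[col]) for col in key_order if col < width]; columns[col] = pyGet?
-- (none = IndexError, outside Pre_); then ''.join(c for c in ''.join(picked) if c != '?')[:len(text)]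
def keyed_columnar_read_alt (text : String) (key_order : List Int) : String :=
  let t := text.toList
  let width := key_order.length
  let padded := pvPaddedA t width
  let columns := pvScatterB width padded
  let picked := (key_order.filter (fun col => col < (width : Int))).map
    (fun col => (PySem.List.pyGet? columns col).getD [])
  String.ofList ((picked.flatten.filter (fun c => c ≠ '?')).take t.length)

-- ===== PRECONDITION & SPEC =====
-- Pre_ excludes exactly: an empty key (both programs raise ZeroDivisionError) and key entries
-- below -len(key_order), on which both programs raise IndexError for non-empty text while for
-- empty text A returns '' and B's columns[col] still raises IndexError.
def Pre_keyed_columnar_read (text : String) (key_order : List Int) : Prop :=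
  key_order ≠ [] ∧ ∀ c ∈ key_order, -(key_order.length : Int) ≤ c
instance (text : String) (key_order : List Int) : Decidable (Pre_keyed_columnar_read text key_order) := by
  unfold Pre_keyed_columnar_read; infer_instance

def pvWitness_keyed_columnar_read : String × List Int := ("HELLOWORLD", [1, 0, 2])

def Spec_keyed_columnar_read (text : String) (key_order : List Int) (out : String) : Prop := out = keyed_columnar_read_alt text key_order
instance (text : String) (key_order : List Int) (out : String) : Decidable (Spec_keyed_columnar_read text key_order out) := by unfold Spec_keyed_columnar_read; infer_instance

-- ===== CLAIM (what is proved, stated in full; the proofs are below) =====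
def Claim_equal_keyed_columnar_read : Prop := ∀ (text : String) (key_order : List Int), Dom_keyed_columnar_read text key_order → Pre_keyed_columnar_read text key_order → Spec_keyed_columnar_read text key_order (keyed_columnar_read text key_order)

-- ===== LEMMAS AND PROOFS =====

-- the bucket of column e: the characters of u at positions ≡ e (mod w), in order
def pvBucket (u : List Char) (w : Nat) (e : Nat) : List Char :=
  (List.range u.length).filterMap (fun j => if j % w = e then u[j]? else none)

-- the wrapped (Python negative-index) column of a key entry
def pvE (w : Nat) (col : Int) : Nat := (col % (w : Int)).toNat

lemma pv_wrap (w : Nat) (hw : 0 < w) (col : Int) (h1 : -(w : Int) ≤ col) (h2 : col < (w : Int)) :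
    pvE w col < w ∧ ((0 ≤ col ∧ col = (pvE w col : Int)) ∨ (col < 0 ∧ col + w = (pvE w col : Int))) := by
  unfold pvE
  by_cases h0 : 0 ≤ col
  · have : col % (w : Int) = col := Int.emod_eq_of_lt h0 h2
    omega
  · have e1 : (col + (w : Int)) % (w : Int) = col % (w : Int) := by
      have := Int.add_mul_emod_self_left (a := col) (b := (w : Int)) (c := 1)
      simpa using this
    have e2 : (col + (w : Int)) % (w : Int) = col + w := Int.emod_eq_of_lt (by omega) (by omega)
    omega

-- arithmetic: len(text) ≤ nrows*width
lemma pv_le_rows_mul (t : List Char) (w : Nat) (hw : 0 < w) : t.length ≤ pvRowsA t w * w := by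
  unfold pvRowsA
  have h1 := Nat.div_add_mod (t.length + w - 1) w
  have h2 : (t.length + w - 1) % w < w := Nat.mod_lt _ hw
  rw [Nat.mul_comm]
  omega

lemma pv_padded_length (t : List Char) (w : Nat) (hw : 0 < w) :
    (pvPaddedA t w).length = pvRowsA t w * w := by
  have := pv_le_rows_mul t w hw
  simp [pvPaddedA]; omega

-- grid[r] = padded[r*w:(r+1)*w] as drop/take
lemma pv_row_eq (t : List Char) (w : Nat) (r : Nat) (hr : r < pvRowsA t w) :
    ((pvGridA t w)[r]?).getD [] = ((pvPaddedA t w).drop (r * w)).take w := by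
  have h : (pvGridA t w)[r]? =
      some (PySem.List.slice (pvPaddedA t w) (some ((r * w : Nat) : Int)) (some (((r + 1) * w : Nat) : Int))) := by
    simp [pvGridA, hr]
  rw [h, Option.getD_some, PySem.List.slice_natCast]
  congr 1
  have : (r + 1) * w = r * w + w := by ring
  omega

lemma pv_row_length (t : List Char) (w : Nat) (hw : 0 < w) (r : Nat) (hr : r < pvRowsA t w) :
    (((pvGridA t w)[r]?).getD []).length = w := by
  rw [pv_row_eq t w r hr]
  have hp := pv_padded_length t w hw
  have h1 : (r + 1) * w ≤ pvRowsA t w * w := Nat.mul_le_mul_right w hr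
  have h2 : r * w + w ≤ pvRowsA t w * w := by nlinarith
  simp [List.length_take, List.length_drop, hp]
  omega

-- the element A reads for an in-range (possibly wrapped) column index
lemma pv_chA_eq (t : List Char) (w : Nat) (hw : 0 < w) (r : Nat) (hr : r < pvRowsA t w)
    (col : Int) (e : Nat) (he : e < w)
    (hcase : (0 ≤ col ∧ col = (e : Int)) ∨ (col < 0 ∧ col + (w : Int) = (e : Int))) :
    pvChA t w r col = (pvPaddedA t w).getD (r * w + e) '?' := by
  have hlen := pv_row_length t w hw r hr
  have hrow := pv_row_eq t w r hr
  have hconv : (((pvGridA t w)[r]?).getD [])[e]? = (pvPaddedA t w)[r * w + e]? := by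
    rw [hrow, List.getElem?_take_of_lt he, List.getElem?_drop]
  unfold pvChA
  simp only [PySem.List.len_eq, hlen]
  have hcw : col < (w : Int) := by rcases hcase with ⟨h0, hce⟩ | ⟨hneg, _⟩ <;> omega
  rw [if_pos hcw, List.getD_eq_getElem?_getD, ← hconv]
  rcases hcase with ⟨h0, hce⟩ | ⟨hneg, hsum⟩
  · have : col = ((e : Nat) : Int) := hce
    rw [this, PySem.List.pyGet?_natCast]
  · have hk : col = -(((w - e : Nat) : Int)) := by omega
    rw [hk, PySem.List.pyGet?_neg_natCast (((pvGridA t w)[r]?).getD []) (w - e)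
      (by omega) (by rw [hlen]; omega)]
    have hidx : (((pvGridA t w)[r]?).getD []).length - (w - e) = e := by rw [hlen]; omega
    rw [hidx]

-- columns at or beyond width read '?'
lemma pv_chA_big (t : List Char) (w : Nat) (hw : 0 < w) (r : Nat) (hr : r < pvRowsA t w)
    (col : Int) (hcol : (w : Int) ≤ col) :
    pvChA t w r col = '?' := by
  unfold pvChA
  have := pv_row_length t w hw r hr
  simp [PySem.List.len_eq, this]
  omega

-- under the final '?'-filter the append-condition of A's inner loop is irrelevant
lemma pv_filter_drop_cond {α : Type} (l : List α) (f : α → Char) (p : α → Prop) [DecidablePred p] :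
    ((l.filter (fun x => decide (f x ≠ '?' ∨ p x))).map f).filter (fun c => decide (c ≠ '?'))
      = (l.map f).filter (fun c => decide (c ≠ '?')) := by
  induction l with
  | nil => simp
  | cons a l ih =>
    by_cases hfa : f a = '?'
    · by_cases hpa : p a
      · rw [List.filter_cons_of_pos (by simp [hfa, hpa]), List.map_cons,
            List.filter_cons_of_neg (by simp [hfa]), List.map_cons,
            List.filter_cons_of_neg (by simp [hfa])]
        exact ih
      · rw [List.filter_cons_of_neg (by simp [hfa, hpa]), List.map_cons,
            List.filter_cons_of_neg (by simp [hfa])]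
        exact ih
    · rw [List.filter_cons_of_pos (by simp [hfa]), List.map_cons,
          List.filter_cons_of_pos (by simp [hfa]), List.map_cons,
          List.filter_cons_of_pos (by simp [hfa])]
      rw [ih]

-- one block of w consecutive indices contributes exactly its column-e cell
lemma pv_one_hot (w : Nat) (e : Nat) (he : e < w) (g : Nat → Option Char) :
    (List.range w).filterMap (fun i => if i = e then g i else none) = (g e).toList := by
  induction w with
  | zero => omega
  | succ w ih =>
    rw [List.range_succ, List.filterMap_append]
    rcases Nat.lt_succ_iff_lt_or_eq.mp he with h | h
    · have : w ≠ e := by omega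
      simp [this, ih h]
    · subst h
      have hpre : (List.range e).filterMap (fun i => if i = e then g i else none) = [] := by
        rw [List.filterMap_eq_nil_iff]
        intro a hamem
        have : a < e := List.mem_range.mp hamem
        simp [Nat.ne_of_lt this]
      rw [hpre, List.nil_append]
      cases h : g e <;> simp [h]

-- blockify: a filterMap over k*w indices is a filterMap over k rows
lemma pv_blockify (u : List Char) (w : Nat) (hw : 0 < w) (e : Nat) (he : e < w) :
    ∀ k : Nat, (List.range (k * w)).filterMap (fun j => if j % w = e then u[j]? else none)
      = (List.range k).filterMap (fun r => u[r * w + e]?) := by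
  intro k
  induction k with
  | zero => simp
  | succ k ih =>
    have hsum : (k + 1) * w = k * w + w := by ring
    rw [hsum, List.range_add, List.filterMap_append, ih, List.range_succ, List.filterMap_append]
    congr 1
    rw [List.filterMap_map]
    have hcong : ∀ i ∈ List.range w,
        ((fun j => if j % w = e then u[j]? else none) ∘ (fun i => k * w + i)) i
          = (fun i => if i = e then u[k * w + i]? else none) i := by
      intro i hi
      have hiw : i < w := List.mem_range.mp hi
      simp only [Function.comp]
      have : (k * w + i) % w = i := by
        rw [Nat.add_comm, Nat.add_mul_mod_self_right]
        exact Nat.mod_eq_of_lt hiw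
      rw [this]
    rw [List.filterMap_congr hcong, pv_one_hot w e he]
    cases h : u[k * w + e]? <;> simp [h]

-- a filterMap of in-range reads is a map of defaulted reads
lemma pv_fm_to_map (u : List Char) (w : Nat) (e : Nat) :
    ∀ (l : List Nat), (∀ r ∈ l, r * w + e < u.length) →
      l.filterMap (fun r => u[r * w + e]?) = l.map (fun r => u.getD (r * w + e) '?') := by
  intro l
  induction l with
  | nil => simp
  | cons a l ih =>
    intro hmem
    have ha : a * w + e < u.length := hmem a List.mem_cons_self
    have hsome : u[a * w + e]? = some (u.getD (a * w + e) '?') := by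
      simp [List.getElem?_eq_getElem ha, List.getD_eq_getElem?_getD]
    rw [List.filterMap_cons_some (f := fun r => u[r * w + e]?) (l := l) hsome, List.map_cons,
      ih (fun r hr => hmem r (List.mem_cons_of_mem a hr))]

-- the padded bucket of column e is exactly A's sequence of reads of that column
lemma pv_bucket_padded (t : List Char) (w : Nat) (hw : 0 < w) (e : Nat) (he : e < w) :
    pvBucket (pvPaddedA t w) w e
      = (List.range (pvRowsA t w)).map (fun r => (pvPaddedA t w).getD (r * w + e) '?') := by
  unfold pvBucket
  rw [pv_padded_length t w hw, pv_blockify (pvPaddedA t w) w hw e he (pvRowsA t w)]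
  apply pv_fm_to_map
  intro r hr
  have hr' : r < pvRowsA t w := List.mem_range.mp hr
  have h1 : (r + 1) * w ≤ pvRowsA t w * w := Nat.mul_le_mul_right w hr'
  rw [pv_padded_length t w hw]
  nlinarith

-- scatter invariant: after the dealing pass, pile e holds the characters at positions ≡ e (mod w)
lemma pv_scatter_loop (w : Nat) (hw : 0 < w) (e : Nat) (he : e < w) :
    ∀ (u : List Char) (s : Nat) (cols : List (List Char)), cols.length = w →
      (((PySem.List.enumerate u (s : Int)).foldl (fun cols p =>
          PySem.List.pySetD cols (PySem.Int.mod p.1 (w : Int))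
            ((PySem.List.pyGetD cols (PySem.Int.mod p.1 (w : Int)) []) ++ [p.2])) cols).getD e [])
        = cols.getD e [] ++ (List.range u.length).filterMap
            (fun k => if (s + k) % w = e then u[k]? else none) := by
  intro u
  induction u with
  | nil => intro s cols _; simp [PySem.List.enumerate]
  | cons ch rest ih =>
    intro s cols hc
    rw [PySem.List.enumerate_cons, List.foldl_cons]
    simp only [PySem.Int.mod_natCast, PySem.List.pyGetD_natCast, PySem.List.pySetD_natCast]
    have hs1 : ((s : Nat) : Int) + 1 = (((s + 1 : Nat)) : Int) := by push_cast; ring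
    rw [hs1, ih (s + 1) (cols.set (s % w) (cols.getD (s % w) [] ++ [ch])) (by simp [hc])]
    have hm : s % w < cols.length := by rw [hc]; exact Nat.mod_lt _ hw
    have hcols' : (cols.set (s % w) (cols.getD (s % w) [] ++ [ch])).getD e []
        = if s % w = e then cols.getD (s % w) [] ++ [ch] else cols.getD e [] := by
      rw [List.getD_eq_getElem?_getD, List.getElem?_set]
      split
      · simp [hm]
      · rw [List.getD_eq_getElem?_getD]
    rw [hcols']
    rw [List.length_cons, List.range_succ_eq_map, List.filterMap_cons, List.filterMap_map]
    have htail : (List.range rest.length).filterMap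
          ((fun k => if (s + k) % w = e then (ch :: rest)[k]? else none) ∘ Nat.succ)
        = (List.range rest.length).filterMap (fun k => if (s + 1 + k) % w = e then rest[k]? else none) := by
      apply List.filterMap_congr
      intro k _
      simp only [Function.comp]
      have h1 : s + (k + 1) = s + 1 + k := by ring
      rw [Nat.succ_eq_add_one, h1, List.getElem?_cons_succ]
    rw [htail]
    by_cases hme : s % w = e
    · have hhead : (s + 0) % w = e := by simpa using hme
      rw [if_pos hme, if_pos hhead, List.getElem?_cons_zero, hme]
      simp [List.append_assoc]
    · have hhead : ¬ (s + 0) % w = e := by simpa using hme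
      rw [if_neg hme, if_neg hhead]

-- pile e of the dealing pass
lemma pv_bucket (u : List Char) (w : Nat) (hw : 0 < w) (e : Nat) (he : e < w) :
    (pvScatterB w u).getD e [] = pvBucket u w e := by
  unfold pvScatterB pvBucket
  have h0 : ((0 : Int)) = ((0 : Nat) : Int) := by norm_num
  rw [h0, pv_scatter_loop w hw e he u 0 (List.replicate w []) (by simp)]
  have : (List.replicate w ([] : List Char)).getD e [] = [] := by
    rw [List.getD_eq_getElem?_getD, List.getElem?_replicate]
    split <;> rfl
  rw [this, List.nil_append]
  simp

-- the dealing pass preserves the number of piles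
lemma pv_scatter_loop_len (w : Nat) : ∀ (u : List Char) (s : Int) (cols : List (List Char)),
    ((PySem.List.enumerate u s).foldl (fun cols p =>
        PySem.List.pySetD cols (PySem.Int.mod p.1 (w : Int))
          ((PySem.List.pyGetD cols (PySem.Int.mod p.1 (w : Int)) []) ++ [p.2])) cols).length
      = cols.length := by
  intro u
  induction u with
  | nil => intro s cols; simp [PySem.List.enumerate]
  | cons ch rest ih =>
    intro s cols
    rw [PySem.List.enumerate_cons, List.foldl_cons, ih]
    simp [PySem.List.length_pySetD]

lemma pv_scatter_length (w : Nat) (u : List Char) : (pvScatterB w u).length = w := by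
  unfold pvScatterB
  rw [pv_scatter_loop_len]
  simp

-- B's pile for an in-range (possibly negative) key entry is the bucket of the wrapped column
lemma pv_colB (u : List Char) (w : Nat) (hw : 0 < w) (col : Int)
    (h1 : -(w : Int) ≤ col) (h2 : col < (w : Int)) :
    (PySem.List.pyGet? (pvScatterB w u) col).getD [] = pvBucket u w (pvE w col) := by
  obtain ⟨he, hcase⟩ := pv_wrap w hw col h1 h2
  have hlen := pv_scatter_length w u
  rw [← pv_bucket u w hw (pvE w col) he]
  generalize hg : pvE w col = e at he hcase ⊢
  rcases hcase with ⟨h0, hce⟩ | ⟨hneg, hsum⟩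
  · rw [hce, PySem.List.pyGet?_natCast, List.getD_eq_getElem?_getD]
  · have hk : col = -(((w - e : Nat) : Int)) := by omega
    rw [hk, PySem.List.pyGet?_neg_natCast (pvScatterB w u) (w - e)
      (by omega) (by rw [hlen]; omega)]
    have hidx : (pvScatterB w u).length - (w - e) = e := by rw [hlen]; omega
    rw [hidx, List.getD_eq_getElem?_getD]

-- A's per-column contribution, filtered, is the filtered padded bucket of the wrapped column
lemma pv_colA (t : List Char) (w : Nat) (hw : 0 < w) (col : Int)
    (h1 : -(w : Int) ≤ col) (h2 : col < (w : Int)) :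
    ((((List.range (pvRowsA t w)).filter (fun r =>
        decide (pvChA t w r col ≠ '?' ∨ ((r * w : Nat) : Int) + col < PySem.List.len t))).map
          (fun r => pvChA t w r col)).filter (fun c => decide (c ≠ '?')))
      = (pvBucket (pvPaddedA t w) w (pvE w col)).filter (fun c => decide (c ≠ '?')) := by
  obtain ⟨he, hcase⟩ := pv_wrap w hw col h1 h2
  rw [pv_filter_drop_cond (List.range (pvRowsA t w)) (fun r => pvChA t w r col)
    (fun r => ((r * w : Nat) : Int) + col < PySem.List.len t)]
  rw [List.map_congr_left (fun r hr =>
    pv_chA_eq t w hw r (List.mem_range.mp hr) col (pvE w col) he hcase)]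
  rw [pv_bucket_padded t w hw (pvE w col) he]

-- key entries at or beyond width contribute nothing after the '?'-filter
lemma pv_colA_big (t : List Char) (w : Nat) (hw : 0 < w) (col : Int) (hcol : (w : Int) ≤ col) :
    ((((List.range (pvRowsA t w)).filter (fun r =>
        decide (pvChA t w r col ≠ '?' ∨ ((r * w : Nat) : Int) + col < PySem.List.len t))).map
          (fun r => pvChA t w r col)).filter (fun c => decide (c ≠ '?'))) = [] := by
  rw [List.filter_eq_nil_iff]
  intro c hc
  obtain ⟨r, hrmem, rfl⟩ := List.mem_map.mp hc
  have hr : r < pvRowsA t w := List.mem_range.mp (List.mem_of_mem_filter hrmem)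
  rw [pv_chA_big t w hw r hr col hcol]
  simp

-- gathering over a filtered list is gathering the kept entries
lemma pv_flatMap_filter {α β : Type} (p : α → Bool) (f : α → List β) :
    ∀ l : List α, (l.filter p).flatMap f = l.flatMap (fun x => if p x then f x else []) := by
  intro l
  induction l with
  | nil => simp
  | cons a l ih =>
    by_cases hp : p a = true
    · rw [List.filter_cons_of_pos hp, List.flatMap_cons, List.flatMap_cons, if_pos hp, ih]
    · rw [List.filter_cons_of_neg (by simp [hp]), List.flatMap_cons, if_neg hp, ih,
        List.nil_append]

-- ===== VERDICT (by name: the statement is the Claim_ definition above) =====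
theorem keyed_columnar_read_spec : Claim_equal_keyed_columnar_read := by
  unfold Claim_equal_keyed_columnar_read
  intro text key _ hpre
  unfold Spec_keyed_columnar_read
  obtain ⟨hk, hlow⟩ := hpre
  have hw : 0 < key.length := List.length_pos_iff.mpr hk
  simp only [keyed_columnar_read, keyed_columnar_read_alt]
  have hA : key.foldl (fun acc col => pvInnerA text.toList key.length col acc) []
      = key.flatMap (fun col => ((List.range (pvRowsA text.toList key.length)).filter (fun r =>
          decide (pvChA text.toList key.length r col ≠ '?' ∨
            ((r * key.length : Nat) : Int) + col < PySem.List.len text.toList))).map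
            (fun r => pvChA text.toList key.length r col)) := by
    rw [show (fun (acc : List Char) (col : Int) => pvInnerA text.toList key.length col acc)
        = (fun (acc : List Char) (col : Int) => acc ++ ((List.range (pvRowsA text.toList key.length)).filter (fun r =>
            decide (pvChA text.toList key.length r col ≠ '?' ∨
              ((r * key.length : Nat) : Int) + col < PySem.List.len text.toList))).map
              (fun r => pvChA text.toList key.length r col)) from
      funext fun acc => funext fun col => by
        unfold pvInnerA; exact PySem.List.foldl_append_ite _ _ _ _]
    rw [PySem.List.foldl_append_eq_flatMap]
    simp
  rw [hA, ← List.flatMap_def, List.filter_flatMap, List.filter_flatMap,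
    pv_flatMap_filter (fun col => decide (col < (key.length : Int)))]
  refine congrArg String.ofList (congrArg (List.take text.toList.length) (List.flatMap_congr ?_))
  intro col hcol
  by_cases hcw : col < (key.length : Int)
  · rw [if_pos (by simpa using hcw),
      pv_colB (pvPaddedA text.toList key.length) key.length hw col (hlow col hcol) hcw,
      pv_colA text.toList key.length hw col (hlow col hcol) hcw]
  · rw [if_neg (by simpa using hcw),
      pv_colA_big text.toList key.length hw col (by omega)]
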